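-- pv_equiv track=rewrite | github.com/Hsiangpo/OldIron | former/Japan/src/web_agent/runner/__init__.py | _mask_args
-- ===== SOURCE A (Python) =====
-- def _mask_args(args: list[str]) -> list[str]:
--     masked: list[str] = []
--     skip_next = False
--     for arg in args:
--         if skip_next:
--             masked.append("***")
--             skip_next = False
--             continue
--         lower = arg.lower()
--         if lower in (
--             "--cookie",
--             "--llm-api-key",
--             "--search-pb",
--             "--search-sourceurl",
--             "--snov-extension-token",
--             "--snov-extension-selector",
--             "--snov-extension-fingerprint",
--         ):
--             masked.append(arg)
--             skip_next = True
--             continue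
--         if lower.startswith("sk-") and len(arg) > 12:
--             masked.append("sk-***")
--             continue
--         masked.append(arg)
--     return masked
-- ===== SOURCE B (Python) =====
-- _SENSITIVE = frozenset((
--     "--cookie",
--     "--llm-api-key",
--     "--search-pb",
--     "--search-sourceurl",
--     "--snov-extension-token",
--     "--snov-extension-selector",
--     "--snov-extension-fingerprint",
-- ))
--
--
-- def _mask_args(args: list[str]) -> list[str]:
--     # Stage 1: flag which arguments are sensitive.
--     sens = [a.lower() in _SENSITIVE for a in args]
--     # Stage 2: compute which positions are masked values, via the recurrence
--     # is_value[i] = sens[i-1] and not is_value[i-1]  (a value position never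
--     # triggers masking of its own successor).
--     is_value = [False] * len(args)
--     for i in range(1, len(args)):
--         is_value[i] = sens[i - 1] and not is_value[i - 1]
--     # Stage 3: render.
--     return [
--         "***" if v
--         else a if s
--         else "sk-***" if a.lower().startswith("sk-") and len(a) > 12
--         else a
--         for a, s, v in zip(args, sens, is_value)
--     ]
-- ===== Notes on version B (the rewrite author's own statement) =====
-- stated objective: alternative
-- what changed: Replaces A's single stateful loop threading a one-shot skip_next boolean with three staged passes: a sensitivity flag list, a separate array filled by the recurrence is_value[i] = sens[i-1] and not is_value[i-1], and a zip comprehension that renders the output from those two precomputed lists.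
import Mathlib
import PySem

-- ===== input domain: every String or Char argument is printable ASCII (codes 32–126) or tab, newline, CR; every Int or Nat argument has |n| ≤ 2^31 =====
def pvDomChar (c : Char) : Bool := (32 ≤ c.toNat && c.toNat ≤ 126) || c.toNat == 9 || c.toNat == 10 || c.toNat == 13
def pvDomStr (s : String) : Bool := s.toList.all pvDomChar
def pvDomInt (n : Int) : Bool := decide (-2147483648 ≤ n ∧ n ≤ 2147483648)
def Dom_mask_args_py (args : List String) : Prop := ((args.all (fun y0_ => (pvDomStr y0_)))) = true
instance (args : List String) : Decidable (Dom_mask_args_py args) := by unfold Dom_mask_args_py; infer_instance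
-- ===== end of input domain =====

-- B replaces A's stateful skip_next loop by three staged passes (sensitivity flags,
-- value-position recurrence, rendering); objective: alternative decomposition, same cost.

-- ===== PORT A =====
-- the tuple membership test of A
def pvSensitive (lower : String) : Bool :=
  lower == "--cookie" || lower == "--llm-api-key" || lower == "--search-pb" ||
  lower == "--search-sourceurl" || lower == "--snov-extension-token" ||
  lower == "--snov-extension-selector" || lower == "--snov-extension-fingerprint"

-- A's for-loop threading the one-shot skip_next boolean, output built element by element
def pvMaskA : List String → Bool → List String
  | [], _ => []
  | arg :: rest, skip_next =>
    if skip_next then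
      "***" :: pvMaskA rest false
    else
      -- lower = arg.lower(), written inline
      if pvSensitive (PySem.Str.lower arg) then
        arg :: pvMaskA rest true
      else if PySem.Str.startswith (PySem.Str.lower arg) "sk-" && PySem.Str.len arg > 12 then
        "sk-***" :: pvMaskA rest false
      else
        arg :: pvMaskA rest false

def mask_args_py (args : List String) : List String := pvMaskA args false

-- ===== PORT B =====
-- Stage 2 of Source B: the recurrence is_value[i] = sens[i-1] && !is_value[i-1], with
-- is_value[0] = false.  The Python fills an array left to right; here the same left-to-right
-- computation carries (sens[i-1], is_value[i-1]) as the two accumulator arguments, and the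
-- initial (false, anything-with-false-result) pair yields the False it starts from.
def pvIsValue : Bool → Bool → List Bool → List Bool
  | _, _, [] => []
  | prevS, prevV, s :: rest =>
    let v := prevS && !prevV
    v :: pvIsValue s v rest

-- Stage 3 of Source B: the comprehension over zip(args, sens, is_value)
def pvRender : List String → List Bool → List Bool → List String
  | a :: as_, s :: ss, v :: vs =>
    (if v then "***"
     else if s then a
     else if PySem.Str.startswith (PySem.Str.lower a) "sk-" && PySem.Str.len a > 12 then "sk-***"
     else a) :: pvRender as_ ss vs
  | _, _, _ => []

def mask_args_py_alt (args : List String) : List String :=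
  let sens := args.map (fun a => pvSensitive (PySem.Str.lower a))
  pvRender args sens (pvIsValue false false sens)

-- ===== PRECONDITION & SPEC =====
def Spec_mask_args_py (args : List String) (out : List String) : Prop := out = mask_args_py_alt args
instance (args : List String) (out : List String) : Decidable (Spec_mask_args_py args out) := by unfold Spec_mask_args_py; infer_instance

-- ===== CLAIM (what is proved, stated in full; the proofs are below) =====
def Claim_equal_mask_args_py : Prop := ∀ (args : List String), Dom_mask_args_py args → Spec_mask_args_py args (mask_args_py args)

-- ===== LEMMAS AND PROOFS =====
-- Loop invariant: A's skip flag equals the current value bit prevS && !prevV of B's recurrence.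
theorem pvMaskA_eq_render : ∀ (args : List String) (pS pV : Bool),
    pvMaskA args (pS && !pV) =
      pvRender args (args.map (fun a => pvSensitive (PySem.Str.lower a)))
        (pvIsValue pS pV (args.map (fun a => pvSensitive (PySem.Str.lower a)))) := by
  intro args
  induction args with
  | nil => intro pS pV; rfl
  | cons a rest ih =>
    intro pS pV
    simp only [List.map, pvIsValue, pvRender, pvMaskA]
    cases hskip : pS && !pV with
    | true =>
      simp only [if_true]
      have := ih (pvSensitive (PySem.Str.lower a)) true
      simpa using this
    | false =>
      simp only [Bool.false_eq_true, if_false]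
      cases hs : pvSensitive (PySem.Str.lower a) with
      | true =>
        simp only [if_true]
        have := ih true false
        simpa using this
      | false =>
        simp only [Bool.false_eq_true, if_false]
        have := ih false false
        cases hsk : PySem.Str.startswith (PySem.Str.lower a) "sk-" && PySem.Str.len a > 12 <;>
          simpa [hsk] using this

-- ===== VERDICT (by name: the statement is the Claim_ definition above) =====
theorem mask_args_py_spec : Claim_equal_mask_args_py := by
  intro args _
  unfold Spec_mask_args_py mask_args_py mask_args_py_alt
  simpa using pvMaskA_eq_render args false false
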